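-- pv_equiv track=rewrite | github.com/heimgewebe/chronik | quality.py | compute_completeness
-- ===== SOURCE A (Python) =====
-- def compute_completeness(payload: dict, required_fields: list[str] | None = None) -> bool:
--     """Check if payload has all required fields.
--
--     Recognizes common field synonyms to avoid false negatives:
--     - kind/type/event (event type)
--     - ts/timestamp/occurred_at (timestamp)
--     - source (provenance)
--
--     Args:
--         payload: The event payload
--         required_fields: List of required field names (optional, uses defaults if None)
--
--     Returns:
--         True if complete, False otherwise
--     """
--     if not isinstance(payload, dict):
--         return False
--
--     if required_fields is not None:
--         # Custom required fields - check exactly as specified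
--         return all(field in payload for field in required_fields)
--
--     # Default: check for core event fields with synonym support
--     # Event type (at least one variant)
--     has_kind = "kind" in payload or "type" in payload or "event" in payload
--
--     # Timestamp (at least one variant)
--     has_timestamp = "ts" in payload or "timestamp" in payload or "occurred_at" in payload
--
--     # Source (provenance)
--     has_source = "source" in payload
--
--     return has_kind and has_timestamp and has_source
-- ===== SOURCE B (Python) =====
-- def compute_completeness(payload: dict, required_fields: list[str] | None = None) -> bool:
--     """Single pass over the payload's keys instead of repeated membership queries."""
--     if not isinstance(payload, dict):
--         return False
--     if required_fields is not None:
--         # subtract the payload's keys from the required set; complete iff nothing is left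
--         missing = set(required_fields)
--         for key in payload:
--             missing.discard(key)
--         return not missing
--     # classify each key we see into the concept it satisfies
--     seen_kind = seen_ts = seen_source = False
--     for key in payload:
--         if key in ("kind", "type", "event"):
--             seen_kind = True
--         elif key in ("ts", "timestamp", "occurred_at"):
--             seen_ts = True
--         elif key == "source":
--             seen_source = True
--     return seen_kind and seen_ts and seen_source
-- ===== Notes on version B (the rewrite author's own statement) =====
-- stated objective: alternative
-- what changed: B inverts the traversal: instead of A's seven membership queries against the payload (or one per required field), B makes a single pass over the payload's keys, classifying each key into the concept it satisfies (flag accumulators) and, in the custom branch, discarding keys from the required set and testing emptiness.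
import Mathlib
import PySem

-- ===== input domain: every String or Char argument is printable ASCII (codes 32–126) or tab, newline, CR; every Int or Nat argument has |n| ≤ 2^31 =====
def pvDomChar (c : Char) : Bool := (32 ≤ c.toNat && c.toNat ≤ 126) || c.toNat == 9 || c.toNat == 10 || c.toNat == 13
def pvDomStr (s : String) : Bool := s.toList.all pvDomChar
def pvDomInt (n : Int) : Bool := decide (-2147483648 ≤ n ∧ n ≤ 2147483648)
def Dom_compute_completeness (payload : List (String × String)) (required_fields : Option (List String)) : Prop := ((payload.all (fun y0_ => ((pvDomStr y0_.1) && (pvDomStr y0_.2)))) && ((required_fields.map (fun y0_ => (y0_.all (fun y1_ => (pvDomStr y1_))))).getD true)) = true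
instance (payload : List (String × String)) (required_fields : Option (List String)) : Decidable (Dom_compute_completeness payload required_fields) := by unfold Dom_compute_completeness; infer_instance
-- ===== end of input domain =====

-- B inverts the traversal: one pass over the payload's keys (flag accumulators /
-- set subtraction) instead of A's repeated membership queries; same cost class.

-- ===== PORT A =====
-- Port of A: the `isinstance(payload, dict)` guard is always true under the type convention.
def compute_completeness (payload : List (String × String)) (required_fields : Option (List String)) : Bool :=
  match required_fields with
  | some fields => fields.all (fun field => PySem.Dict.contains ⟨payload⟩ field)
  | none =>
    let has_kind := PySem.Dict.contains ⟨payload⟩ "kind" || PySem.Dict.contains ⟨payload⟩ "type" || PySem.Dict.contains ⟨payload⟩ "event"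
    let has_timestamp := PySem.Dict.contains ⟨payload⟩ "ts" || PySem.Dict.contains ⟨payload⟩ "timestamp" || PySem.Dict.contains ⟨payload⟩ "occurred_at"
    let has_source := PySem.Dict.contains ⟨payload⟩ "source"
    has_kind && has_timestamp && has_source

-- ===== PORT B =====
-- one iteration step of B's default-branch loop: classify a payload key into its concept flag
def pvStep (s : Bool × Bool × Bool) (kv : String × String) : Bool × Bool × Bool :=
  if kv.1 == "kind" || kv.1 == "type" || kv.1 == "event" then (true, s.2.1, s.2.2)
  else if kv.1 == "ts" || kv.1 == "timestamp" || kv.1 == "occurred_at" then (s.1, true, s.2.2)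
  else if kv.1 == "source" then (s.1, s.2.1, true)
  else s

def compute_completeness_alt (payload : List (String × String)) (required_fields : Option (List String)) : Bool :=
  match required_fields with
  | some fields =>
    -- missing = set(required_fields); for key in payload: missing.discard(key); return not missing
    let missing := payload.foldl (fun m kv => PySem.Set.discard m kv.1) (PySem.Set.ofList fields)
    missing.isEmpty
  | none =>
    let seen := payload.foldl pvStep (false, false, false)
    seen.1 && seen.2.1 && seen.2.2

-- ===== PRECONDITION & SPEC =====
def Spec_compute_completeness (payload : List (String × String)) (required_fields : Option (List String)) (out : Bool) : Prop := out = compute_completeness_alt payload required_fields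
instance (payload : List (String × String)) (required_fields : Option (List String)) (out : Bool) : Decidable (Spec_compute_completeness payload required_fields out) := by unfold Spec_compute_completeness; infer_instance

-- ===== CLAIM =====
def Claim_equal_compute_completeness : Prop := ∀ (payload : List (String × String)) (required_fields : Option (List String)), Dom_compute_completeness payload required_fields → Spec_compute_completeness payload required_fields (compute_completeness payload required_fields)

-- ===== LEMMAS AND PROOFS =====

lemma mem_foldl_discard (payload : List (String × String)) (s : List String) (y : String) :
    y ∈ payload.foldl (fun m kv => PySem.Set.discard m kv.1) s ↔
      y ∈ s ∧ ∀ kv ∈ payload, kv.1 ≠ y := by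
  induction payload generalizing s with
  | nil => simp
  | cons kv rest ih =>
    simp only [List.foldl_cons, ih, PySem.Set.mem_discard, List.mem_cons]
    constructor
    · rintro ⟨⟨hy, hne⟩, h⟩
      refine ⟨hy, fun p hp => ?_⟩
      rcases hp with rfl | hp
      · exact fun he => hne he.symm
      · exact h p hp
    · rintro ⟨hy, h⟩
      exact ⟨⟨hy, fun he => h kv (Or.inl rfl) he.symm⟩, fun p hp => h p (Or.inr hp)⟩

lemma foldl_pvStep (payload : List (String × String)) (a b c : Bool) :
    payload.foldl pvStep (a, b, c) =
      (a || payload.any (fun kv => kv.1 == "kind" || kv.1 == "type" || kv.1 == "event"),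
       b || payload.any (fun kv => kv.1 == "ts" || kv.1 == "timestamp" || kv.1 == "occurred_at"),
       c || payload.any (fun kv => kv.1 == "source")) := by
  induction payload generalizing a b c with
  | nil => simp
  | cons kv rest ih =>
    simp only [List.foldl_cons, List.any_cons, pvStep]
    split_ifs with h1 h2 h3
    · simp only [Bool.or_eq_true, beq_iff_eq] at h1
      rw [ih]; rcases h1 with (h | h) | h <;> simp [h, Bool.or_comm]
    · simp only [Bool.or_eq_true, beq_iff_eq] at h2
      rw [ih]; rcases h2 with (h | h) | h <;> simp [h, Bool.or_comm]
    · rw [ih]; simp [show kv.1 = "source" by simpa using h3, Bool.or_comm]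
    · simp only [Bool.or_eq_true, beq_iff_eq, not_or] at h1 h2 h3
      rw [ih]
      have e1 : (kv.1 == "kind") = false := beq_eq_false_iff_ne.mpr h1.1.1
      have e2 : (kv.1 == "type") = false := beq_eq_false_iff_ne.mpr h1.1.2
      have e3 : (kv.1 == "event") = false := beq_eq_false_iff_ne.mpr h1.2
      have e4 : (kv.1 == "ts") = false := beq_eq_false_iff_ne.mpr h2.1.1
      have e5 : (kv.1 == "timestamp") = false := beq_eq_false_iff_ne.mpr h2.1.2
      have e6 : (kv.1 == "occurred_at") = false := beq_eq_false_iff_ne.mpr h2.2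
      have e7 : (kv.1 == "source") = false := beq_eq_false_iff_ne.mpr h3
      simp [e1, e2, e3, e4, e5, e6, e7]

lemma custom_branch (payload : List (String × String)) (fields : List String) :
    compute_completeness payload (some fields) = compute_completeness_alt payload (some fields) := by
  simp only [compute_completeness, compute_completeness_alt]
  rw [Bool.eq_iff_iff]
  simp only [List.all_eq_true, List.isEmpty_iff, List.eq_nil_iff_forall_not_mem,
    mem_foldl_discard, PySem.Set.mem_ofList, PySem.Dict.contains_mk, List.any_eq_true,
    not_and, not_forall, beq_iff_eq]
  constructor
  · rintro h y hy
    obtain ⟨kv, hkv, he⟩ := h y hy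
    exact ⟨kv, hkv, fun hne => hne he⟩
  · intro h f hf
    obtain ⟨kv, hkv, he⟩ := h f hf
    exact ⟨kv, hkv, not_not.mp he⟩

-- ===== VERDICT =====
theorem compute_completeness_spec : Claim_equal_compute_completeness := by
  intro payload required_fields _
  unfold Spec_compute_completeness
  cases required_fields with
  | some fields => exact custom_branch payload fields
  | none =>
    simp only [compute_completeness, compute_completeness_alt, foldl_pvStep, Bool.false_or]
    rw [Bool.eq_iff_iff]
    simp only [PySem.Dict.contains_mk, List.any_eq_true, Bool.or_eq_true, Bool.and_eq_true,
      and_or_left, or_and_right, exists_or]
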